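-- pv_equiv track=rewrite | github.com/jparouca/waybardotfiles | scripts/obsidian.py | get_unfinished_tasks
-- ===== SOURCE A (Python) =====
-- def get_unfinished_tasks(note_content):
--     if note_content is None:
--         return None
--     lines = note_content.split('\n')
--     unfinished_tasks = []
--
--     for i, line in enumerate(lines):
--         if line.startswith("- [ ]"):
--             task_text = line.strip()[6:]
--
--             start_index = i + 1
--             task_description_lines = [lines[j].strip() for j in range(
--                 start_index, len(lines)) if lines[j].strip()]
--             task_description = ' '.join(task_description_lines)
--
--             unfinished_tasks.append(
--                 {"text": task_text, "tooltip": task_description})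
--
--     return unfinished_tasks
-- ===== SOURCE B (Python) =====
-- def get_unfinished_tasks(note_content):
--     # Single reverse pass: maintain the non-empty stripped suffix lines seen so far,
--     # so each task's tooltip is one join instead of a fresh scan of the rest of the file.
--     if note_content is None:
--         return None
--     lines = note_content.split('\n')
--     results = []
--     suffix = []  # non-empty stripped lines strictly after the current line, in order
--     for line in reversed(lines):
--         stripped = line.strip()
--         if line.startswith("- [ ]"):
--             results.append({"text": stripped[6:], "tooltip": ' '.join(suffix)})
--         if stripped:
--             suffix = [stripped] + suffix
--     results.reverse()
--     return results
-- ===== Notes on version B (the rewrite author's own statement) =====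
-- stated objective: alternative
-- what changed: Replaced the per-task rescan of all following lines (nested comprehension over range(i+1, len(lines))) by a single reverse pass that maintains the list of non-empty stripped suffix lines, reversing the collected tasks at the end.
import Mathlib
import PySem

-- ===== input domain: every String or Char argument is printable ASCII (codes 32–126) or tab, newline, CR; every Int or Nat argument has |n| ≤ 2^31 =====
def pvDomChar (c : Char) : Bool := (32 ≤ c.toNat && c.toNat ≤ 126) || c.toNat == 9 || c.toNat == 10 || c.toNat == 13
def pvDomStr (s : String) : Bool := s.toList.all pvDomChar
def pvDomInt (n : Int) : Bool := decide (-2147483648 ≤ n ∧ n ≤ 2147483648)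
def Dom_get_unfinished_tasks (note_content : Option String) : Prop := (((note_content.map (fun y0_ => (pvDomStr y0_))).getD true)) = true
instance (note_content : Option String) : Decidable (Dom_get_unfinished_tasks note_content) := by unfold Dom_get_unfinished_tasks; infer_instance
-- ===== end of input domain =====

-- B replaces A's per-task rescan of the remaining lines by one reverse pass that
-- maintains the non-empty stripped suffix lines (one pass instead of nested passes).


-- ===== PORT A =====
def get_unfinished_tasks (note_content : Option String) : Option (List (List (String × String))) :=
  match note_content with
  | none => none
  | some content =>
    let lines := (PySem.Str.split? content "\n").getD []   -- separator "\n" ≠ "": split? is `some` here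
    some ((PySem.List.enumerate lines).foldl (fun acc p =>
      if PySem.Str.startswith p.2 "- [ ]" then
        let task_text := PySem.Str.slice (PySem.Str.strip p.2) (some 6) none
        let task_description_lines :=
          ((PySem.List.pyRange (p.1 + 1) lines.length).map
            (fun j => PySem.Str.strip (PySem.List.pyGetD lines j ""))).filter (fun s => s ≠ "")
        let task_description := PySem.Str.join " " task_description_lines
        acc ++ [[("text", task_text), ("tooltip", task_description)]]
      else acc) [])

-- ===== PORT B =====
def get_unfinished_tasks_alt (note_content : Option String) : Option (List (List (String × String))) :=
  match note_content with
  | none => none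
  | some content =>
    let lines := (PySem.Str.split? content "\n").getD []   -- separator "\n" ≠ "": split? is `some` here
    let st := lines.reverse.foldl
      (fun (st : List String × List (List (String × String))) line =>
        let stripped := PySem.Str.strip line
        let results :=
          if PySem.Str.startswith line "- [ ]" then
            st.2 ++ [[("text", PySem.Str.slice stripped (some 6) none),
                      ("tooltip", PySem.Str.join " " st.1)]]
          else st.2
        let suffix := if stripped ≠ "" then stripped :: st.1 else st.1
        (suffix, results)) ([], [])
    some st.2.reverse

-- ===== PRECONDITION & SPEC =====
def Spec_get_unfinished_tasks (note_content : Option String) (out : Option (List (List (String × String)))) : Prop := out = get_unfinished_tasks_alt note_content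
instance (note_content : Option String) (out : Option (List (List (String × String)))) : Decidable (Spec_get_unfinished_tasks note_content out) := by unfold Spec_get_unfinished_tasks; infer_instance

-- ===== CLAIM (what is proved, stated in full; the proofs are below) =====
def Claim_equal_get_unfinished_tasks : Prop := ∀ (note_content : Option String), Dom_get_unfinished_tasks note_content → Spec_get_unfinished_tasks note_content (get_unfinished_tasks note_content)

-- ===== LEMMAS AND PROOFS =====

/-- The non-empty stripped lines of a list, in order. -/
def pvNonEmpty (lines : List String) : List String :=
  (lines.map PySem.Str.strip).filter (fun s => s ≠ "")

/-- Reference shape of the result: one entry per "- [ ]" line, tooltip = join of the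
    non-empty stripped lines after it. -/
def pvTasks : List String → List (List (String × String))
  | [] => []
  | l :: rest =>
    (if PySem.Str.startswith l "- [ ]" then
      [[("text", PySem.Str.slice (PySem.Str.strip l) (some 6) none),
        ("tooltip", PySem.Str.join " " (pvNonEmpty rest))]]
     else []) ++ pvTasks rest

lemma pvRange_map_getD (lines : List String) :
    ∀ (n k : Nat), k ≤ lines.length → lines.length - k = n →
    (PySem.List.pyRange (k : Int) lines.length).map
      (fun j => PySem.List.pyGetD lines j "") = lines.drop k := by
  intro n
  induction n with
  | zero =>
    intro k hk hn
    have hk' : k = lines.length := by omega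
    subst hk'
    simp [PySem.List.pyRange]
  | succ n ih =>
    intro k hk hn
    have hklt : k < lines.length := by omega
    have hlt : (k : Int) < lines.length := by exact_mod_cast hklt
    rw [PySem.List.pyRange_one_cons hlt, List.map_cons]
    have h1 : ((k : Int) + 1) = ((k + 1 : Nat) : Int) := by push_cast; ring
    rw [h1, ih (k + 1) (by omega) (by omega)]
    rw [PySem.List.pyGetD_eq_getElem lines "" (by positivity) hlt]
    simp [List.getElem_cons_drop]

lemma pvA_loop (lines : List String) :
    ∀ (suffix : List String) (k : Nat) (acc : List (List (String × String))),
    suffix = lines.drop k →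
    (PySem.List.enumerate suffix (k : Int)).foldl (fun acc p =>
      if PySem.Str.startswith p.2 "- [ ]" then
        let task_text := PySem.Str.slice (PySem.Str.strip p.2) (some 6) none
        let task_description_lines :=
          ((PySem.List.pyRange (p.1 + 1) lines.length).map
            (fun j => PySem.Str.strip (PySem.List.pyGetD lines j ""))).filter (fun s => s ≠ "")
        let task_description := PySem.Str.join " " task_description_lines
        acc ++ [[("text", task_text), ("tooltip", task_description)]]
      else acc) acc = acc ++ pvTasks suffix := by
  intro suffix
  induction suffix with
  | nil => intro k acc _; simp [PySem.List.enumerate, pvTasks]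
  | cons l rest ih =>
    intro k acc hdrop
    have hk : k < lines.length := by
      by_contra h
      rw [List.drop_eq_nil_of_le (by omega)] at hdrop
      exact List.cons_ne_nil _ _ hdrop
    have hrest : rest = lines.drop (k + 1) := by
      have := congrArg List.tail hdrop
      simpa [List.tail_drop] using this
    have h1 : ((k : Int) + 1) = ((k + 1 : Nat) : Int) := by push_cast; ring
    have hdesc : ((PySem.List.pyRange (((k + 1 : Nat) : Int)) lines.length).map
        (fun j => PySem.Str.strip (PySem.List.pyGetD lines j ""))).filter (fun s => s ≠ "")
        = pvNonEmpty rest := by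
      have hmm := pvRange_map_getD lines (lines.length - (k + 1)) (k + 1) (by omega) rfl
      have h2 : (PySem.List.pyRange (((k + 1 : Nat) : Int)) lines.length).map
            (fun j => PySem.Str.strip (PySem.List.pyGetD lines j ""))
          = List.map PySem.Str.strip (lines.drop (k + 1)) := by
        rw [← hmm, List.map_map]
        rfl
      rw [h2, ← hrest]
      rfl
    have henum : PySem.List.enumerate (l :: rest) (k : Int)
        = ((k : Int), l) :: PySem.List.enumerate rest ((k : Int) + 1) := rfl
    rw [henum, List.foldl_cons, h1, ih (k + 1) _ hrest]
    simp only [pvTasks]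
    split_ifs with hsw
    · rw [hdesc]
      simp [List.append_assoc]
    · simp

lemma pvB_loop (lines : List String) :
    lines.foldr (fun line (st : List String × List (List (String × String))) =>
        let stripped := PySem.Str.strip line
        let results :=
          if PySem.Str.startswith line "- [ ]" then
            st.2 ++ [[("text", PySem.Str.slice stripped (some 6) none),
                      ("tooltip", PySem.Str.join " " st.1)]]
          else st.2
        let suffix := if stripped ≠ "" then stripped :: st.1 else st.1
        (suffix, results)) ([], [])
      = (pvNonEmpty lines, (pvTasks lines).reverse) := by
  induction lines with
  | nil => simp [pvNonEmpty, pvTasks]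
  | cons l rest ih =>
    rw [List.foldr_cons, ih]
    by_cases hsw : PySem.Str.startswith l "- [ ]" <;>
      by_cases hne : PySem.Str.strip l = "" <;>
        simp_all [pvTasks, pvNonEmpty]

-- ===== VERDICT (by name: the statement is the Claim_ definition above) =====
theorem get_unfinished_tasks_spec : Claim_equal_get_unfinished_tasks := by
  intro note_content _
  unfold Spec_get_unfinished_tasks get_unfinished_tasks get_unfinished_tasks_alt
  cases note_content with
  | none => rfl
  | some content =>
    simp only
    set lines := (PySem.Str.split? content "\n").getD [] with hlines
    rw [List.foldl_reverse]
    rw [pvB_loop lines]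
    have hA := pvA_loop lines lines 0 [] (by simp)
    simp only [Nat.cast_zero] at hA
    rw [hA]
    simp
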